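-- pv_equiv track=rewrite | github.com/BoB-Dev-Top30/Firewall | MONITOR/Process_Log.py | get_ip_data
-- ===== SOURCE A (Python) =====
-- from collections import Counter
--
-- def get_ip_data(processed_log):
--
--     ip_list = []
--
--     # 각 로그 항목에서 IP 주소를 추출
--     for log in processed_log:
--         ip_list.append(log['src_ip'])
--         ip_list.append(log['dst_ip'])
--
--     # Counter 객체를 이용해 각 IP 주소의 등장 횟수를 계산
--     ip_counter = Counter(ip_list)
--
--     # 가장 많이 등장한 5개의 IP 주소 추출
--     top5_ip = ip_counter.most_common(5)
--
--     # IP 주소와 등장 횟수를 각각의 리스트로 분리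
--     ip_list = [ip[0] for ip in top5_ip]
--     count_list = [ip[1] for ip in top5_ip]
--
--     # 결과를 반환
--     return ip_list, count_list
-- ===== SOURCE B (Python) =====
-- def get_ip_data(processed_log):
--     # single pass: count src/dst IPs directly into a dict (first-seen insertion order)
--     counts = {}
--     for log in processed_log:
--         for ip in (log['src_ip'], log['dst_ip']):
--             counts[ip] = counts.get(ip, 0) + 1
--     # top 5 by repeated selection: five scans, each extracting the first
--     # remaining item with the maximal count (no sort, no heap)
--     items = list(counts.items())
--     ip_list, count_list = [], []
--     for _ in range(5):
--         best, bj = None, -1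
--         for j, pair in enumerate(items):
--             if best is None or pair[1] > best[1]:
--                 best, bj = pair, j
--         if best is None:
--             break
--         items.pop(bj)
--         ip_list.append(best[0])
--         count_list.append(best[1])
--     return ip_list, count_list
-- ===== Notes on version B (the rewrite author's own statement) =====
-- stated objective: alternative
-- what changed: B drops A's intermediate ip_list and Counter: it counts both IPs per log directly into a plain dict in one pass, then selects the top 5 by repeated selection (five scans, each extracting the first remaining item with the maximal count) instead of most_common's sort/heap-based selection.
import Mathlib
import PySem

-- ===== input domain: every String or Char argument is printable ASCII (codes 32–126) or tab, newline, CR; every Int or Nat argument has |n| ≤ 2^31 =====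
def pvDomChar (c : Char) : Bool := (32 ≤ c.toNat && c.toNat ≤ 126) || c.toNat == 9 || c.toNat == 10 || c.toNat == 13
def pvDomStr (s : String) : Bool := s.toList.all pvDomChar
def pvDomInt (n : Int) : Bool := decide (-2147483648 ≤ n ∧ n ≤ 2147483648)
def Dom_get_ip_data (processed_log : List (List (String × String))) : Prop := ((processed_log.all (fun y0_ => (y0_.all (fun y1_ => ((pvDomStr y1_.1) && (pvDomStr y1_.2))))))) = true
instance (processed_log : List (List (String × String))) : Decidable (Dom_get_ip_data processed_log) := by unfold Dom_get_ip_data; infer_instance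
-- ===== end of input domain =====

-- B counts both IPs per log directly into one dict in a single pass (no intermediate ip_list,
-- no Counter) and selects the top 5 by repeated selection — five scans, each extracting the
-- first remaining item with the maximal count — instead of most_common's sort/heap.
-- Equivalence of the RETURN value on all inputs where both 'src_ip' and 'dst_ip' are present.

-- ===== PORT A =====
-- log['src_ip'] is a first-match association-list lookup; `.getD ""` never fires under Pre_
-- (Python raises KeyError exactly where the lookup is none, and Pre_ excludes those inputs).
def get_ip_data (processed_log : List (List (String × String))) : List String × List Int :=
  let ip_list := processed_log.foldl
    (fun acc log => (acc ++ [(log.lookup "src_ip").getD ""]) ++ [(log.lookup "dst_ip").getD ""]) []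
  let ip_counter := PySem.Dict.counter ip_list
  -- most_common(5): stable sort by count descending, first five
  let top5_ip := (PySem.List.sorted ip_counter.items (fun kv => kv.2) true).take 5
  (top5_ip.map (fun ip => ip.1), top5_ip.map (fun ip => ip.2))

-- ===== PORT B =====
-- the inner 'for j, pair in enumerate(items)' loop of Source B: state (best, bj) packed as
-- Option (pair × index); returns the first item with maximal count, with its index
def bestOf (items : List (String × Int)) : Option ((String × Int) × Int) :=
  (PySem.List.enumerate items).foldl
    (fun best jp =>
      match best with
      | none => some (jp.2, jp.1)
      | some (b, bj) => if jp.2.2 > b.2 then some (jp.2, jp.1) else some (b, bj))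
    none

-- the 'for _ in range(5)' loop of Source B; the 'none' arm of pop? never fires (bj is a
-- valid index whenever bestOf returns it) and only makes the function total
def selRounds : Nat → List (String × Int) → List String → List Int → List String × List Int
  | 0, _, ip_list, count_list => (ip_list, count_list)
  | n + 1, items, ip_list, count_list =>
    match bestOf items with
    | none => (ip_list, count_list)            -- best is None: break
    | some (best, bj) =>
      match PySem.List.pop? items bj with
      | some (_, rest) => selRounds n rest (ip_list ++ [best.1]) (count_list ++ [best.2])
      | none => (ip_list, count_list)

def get_ip_data_alt (processed_log : List (List (String × String))) : List String × List Int :=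
  let counts := processed_log.foldl
    (fun d log =>
      [(log.lookup "src_ip").getD "", (log.lookup "dst_ip").getD ""].foldl
        (fun d ip => d.insert ip (d.getD ip 0 + 1)) d)
    PySem.Dict.empty
  selRounds 5 counts.items [] []

-- ===== PRECONDITION & SPEC =====
-- Pre_: every log entry has both keys; elsewhere the Python A (and B) raises KeyError.
def Pre_get_ip_data (processed_log : List (List (String × String))) : Prop :=
  ∀ log ∈ processed_log, (log.lookup "src_ip").isSome ∧ (log.lookup "dst_ip").isSome
instance (processed_log : List (List (String × String))) : Decidable (Pre_get_ip_data processed_log) := by unfold Pre_get_ip_data; infer_instance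

def pvWitness_get_ip_data : (List (List (String × String))) :=
  [[("src_ip", "1.1.1.1"), ("dst_ip", "2.2.2.2")], [("src_ip", "1.1.1.1"), ("dst_ip", "3.3.3.3")]]

def Spec_get_ip_data (processed_log : List (List (String × String))) (out : List String × List Int) : Prop := out = get_ip_data_alt processed_log
instance (processed_log : List (List (String × String))) (out : List String × List Int) : Decidable (Spec_get_ip_data processed_log out) := by unfold Spec_get_ip_data; infer_instance

-- ===== CLAIM (what is proved, stated in full; the proofs are below) =====
def Claim_equal_get_ip_data : Prop := ∀ (processed_log : List (List (String × String))), Dom_get_ip_data processed_log → Pre_get_ip_data processed_log → Spec_get_ip_data processed_log (get_ip_data processed_log)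

-- ===== LEMMAS AND PROOFS =====

-- folding a step over a flattened accumulation = folding the per-chunk folds
theorem foldl_flatten {α β γ : Type} (f : β → List α) (step : γ → α → γ) :
    ∀ (pl : List β) (acc : List α) (d : γ),
      (pl.foldl (fun a l => a ++ f l) acc).foldl step d
        = pl.foldl (fun g l => (f l).foldl step g) (acc.foldl step d) := by
  intro pl
  induction pl with
  | nil => intro acc d; rfl
  | cons l t ih =>
    intro acc d
    simp only [List.foldl_cons]
    rw [ih, List.foldl_append]

-- B's one-pass dict equals Counter of A's flattened ip_list.
theorem counts_eq_counter (pl : List (List (String × String))) :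
    pl.foldl
      (fun d log =>
        [(log.lookup "src_ip").getD "", (log.lookup "dst_ip").getD ""].foldl
          (fun d ip => d.insert ip (d.getD ip 0 + 1)) d)
      PySem.Dict.empty
    = PySem.Dict.counter
        (pl.foldl
          (fun acc log => (acc ++ [(log.lookup "src_ip").getD ""]) ++ [(log.lookup "dst_ip").getD ""]) []) := by
  rw [← PySem.Dict.foldl_insert_getD_add_one_eq_counter]
  simp only [List.append_assoc, List.singleton_append]
  exact (foldl_flatten _ _ _ [] _).symm

-- one reverse step of the inner scan
theorem bestOf_append (xs : List (String × Int)) (x : String × Int) :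
    bestOf (xs ++ [x])
      = match bestOf xs with
        | none => some (x, (xs.length : Int))
        | some (b, bj) => if x.2 > b.2 then some (x, (xs.length : Int)) else some (b, bj) := by
  unfold bestOf
  rw [PySem.List.enumerate_append, List.foldl_append]
  simp [PySem.List.enumerate]

theorem bestOf_none_iff (xs : List (String × Int)) : bestOf xs = none ↔ xs = [] := by
  induction xs using List.reverseRecOn with
  | nil => simp [bestOf, PySem.List.enumerate]
  | append_singleton ys y ih =>
    rw [bestOf_append]
    constructor
    · intro h
      cases hb : bestOf ys with
      | none => rw [hb] at h; simp at h
      | some p => rw [hb] at h; cases p with | mk b bj => by_cases hc : y.2 > b.2 <;> simp [hc] at h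
    · intro h; simp at h

-- the index bestOf returns is a valid position of its item
theorem bestOf_bounds (xs : List (String × Int)) (b : String × Int) (bj : Int)
    (h : bestOf xs = some (b, bj)) :
    ∃ k : Nat, bj = (k : Int) ∧ k < xs.length ∧ xs[k]? = some b := by
  induction xs using List.reverseRecOn generalizing b bj with
  | nil => simp [bestOf, PySem.List.enumerate] at h
  | append_singleton ys y ih =>
    rw [bestOf_append] at h
    cases hb : bestOf ys with
    | none =>
      rw [hb] at h
      simp at h
      obtain ⟨h1, h2⟩ := h
      exact ⟨ys.length, h2.symm, by simp, by simp [h1]⟩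
    | some p =>
      cases p with | mk b0 bj0 =>
      rw [hb] at h
      by_cases hc : y.2 > b0.2
      · simp [hc] at h
        exact ⟨ys.length, h.2.symm, by simp, by simp [h.1]⟩
      · simp [hc] at h
        obtain ⟨k, hk1, hk2, hk3⟩ := ih b0 bj0 hb
        refine ⟨k, by rw [← h.2, hk1], by simp; omega, ?_⟩
        rw [← h.1, List.getElem?_append_left hk2]
        exact hk3

-- appending one element to a reverse-sorted list = one insertBy step
theorem sorted_rev_append_singleton (xs : List (String × Int)) (x : String × Int) :
    PySem.List.sorted (xs ++ [x]) (fun kv => kv.2) true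
      = PySem.List.insertBy (fun a b => decide (b.2 < a.2)) x
          (PySem.List.sorted xs (fun kv => kv.2) true) := by
  rw [PySem.List.sorted_rev_eq_foldl_insertBy, PySem.List.sorted_rev_eq_foldl_insertBy,
    List.foldl_append]
  rfl

-- the heart: the stable descending sort starts with the FIRST maximal item, and its tail
-- is the sort of the list with that item removed
theorem sorted_rev_eq_best_cons (xs : List (String × Int)) (b : String × Int) (bj : Nat)
    (h : bestOf xs = some (b, (bj : Int))) :
    PySem.List.sorted xs (fun kv => kv.2) true
      = b :: PySem.List.sorted (xs.eraseIdx bj) (fun kv => kv.2) true := by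
  induction xs using List.reverseRecOn generalizing b bj with
  | nil => simp [bestOf, PySem.List.enumerate] at h
  | append_singleton ys y ih =>
    rw [bestOf_append] at h
    rw [sorted_rev_append_singleton]
    cases hb : bestOf ys with
    | none =>
      have hy : ys = [] := (bestOf_none_iff ys).mp hb
      subst hy
      rw [hb] at h
      simp at h
      obtain ⟨h1, h2⟩ := h
      subst h1
      have : bj = 0 := by omega
      subst this
      simp [PySem.List.sorted, PySem.List.insertBy]
    | some p =>
      cases p with | mk b0 bj0 =>
      rw [hb] at h
      obtain ⟨k, hk1, hk2, hk3⟩ := bestOf_bounds ys b0 bj0 hb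
      subst hk1
      by_cases hc : y.2 > b0.2
      · simp [hc] at h
        obtain ⟨h1, h2⟩ := h
        subst h1
        have hbj : bj = ys.length := by omega
        subst hbj
        rw [ih b0 k hb]
        rw [List.eraseIdx_append, if_neg (by omega)]
        simp only [Nat.sub_self, List.eraseIdx, List.append_nil]
        rw [ih b0 k hb]
        simp [PySem.List.insertBy, hc]
      · simp [hc] at h
        obtain ⟨h1, h2⟩ := h
        have hbj : bj = k := by omega
        rw [← h1, hbj]
        rw [ih b0 k hb]
        have hnc : ¬ (b0.2 < y.2) := by omega
        have hstep : PySem.List.insertBy (fun a b => decide (b.2 < a.2)) y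
            (b0 :: PySem.List.sorted (ys.eraseIdx k) (fun kv => kv.2) true)
            = b0 :: PySem.List.insertBy (fun a b => decide (b.2 < a.2)) y
                (PySem.List.sorted (ys.eraseIdx k) (fun kv => kv.2) true) := by
          simp [PySem.List.insertBy, hnc]
        rw [hstep, ← sorted_rev_append_singleton]
        rw [List.eraseIdx_append, if_pos hk2]

-- the selection loop produces exactly the first n entries of the stable descending sort
theorem selRounds_eq_take_sorted :
    ∀ (n : Nat) (items : List (String × Int)) (ips : List String) (cnts : List Int),
      selRounds n items ips cnts
        = (ips ++ ((PySem.List.sorted items (fun kv => kv.2) true).take n).map (fun p => p.1),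
           cnts ++ ((PySem.List.sorted items (fun kv => kv.2) true).take n).map (fun p => p.2)) := by
  intro n
  induction n with
  | zero => intro items ips cnts; simp [selRounds]
  | succ n ih =>
    intro items ips cnts
    cases hb : bestOf items with
    | none =>
      have : items = [] := (bestOf_none_iff items).mp hb
      subst this
      simp [selRounds, hb, PySem.List.sorted]
    | some p =>
      cases p with | mk b bj =>
      obtain ⟨k, hk1, hk2, hk3⟩ := bestOf_bounds items b bj hb
      subst hk1
      have hpop : PySem.List.pop? items (k : Int) = some (items[k], items.eraseIdx k) :=
        PySem.List.pop?_natCast items k hk2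
      have hbval : items[k] = b := by
        have := hk3; simp [List.getElem?_eq_getElem hk2] at this; exact this
      rw [sorted_rev_eq_best_cons items b k hb]
      simp only [selRounds, hb, hpop, ih, List.take_succ_cons, List.map_cons]
      simp

-- ===== VERDICT (by name: the statement is the Claim_ definition above) =====
theorem get_ip_data_spec : Claim_equal_get_ip_data := by
  intro pl _ _
  unfold Spec_get_ip_data get_ip_data get_ip_data_alt
  rw [counts_eq_counter, selRounds_eq_take_sorted]
  simp
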